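-- pv_equiv track=rewrite | github.com/Chiaki2333/iPv6-Complete | iPv6-Complete.py | ipv6_1_2
-- ===== SOURCE A (Python) =====
-- def ipv6_1_2(ipv6_1):
--     #check ipv6
--     ff = False
--     if ipv6_1[0]=='[' and ipv6_1[-1]==']':ff = True
--     ipv6_1 = ipv6_1.replace('[','').replace(']','')
--     for i in ipv6_1:
--         if i == ':' or i=='[' or i==']':continue
--         if not (ord(i)>=ord('0') and ord(i)<=ord('9')) and not (ord(i)>=ord('A') and ord(i)<=ord('F')) and not (ord(i)>=ord('a') and ord(i)<=ord('f')):
--             return 'Your IPv6 is wrong!'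
--     if ipv6_1.count('::') >= 2 or ipv6_1.count(':') >= 8 or len(ipv6_1)>39:
--         return 'Your IPv6 is wrong!'
--
--     if '::' in ipv6_1:
--         ipv6_1 = ipv6_1.replace('::',':'*(9-ipv6_1.count(':')))
--     flag = 0
--     tmp = ''
--     ipv6_2 = ''
--     for i in ipv6_1:
--         if i != ':':
--             flag += 1
--             tmp += i
--         elif i == ':':
--             ipv6_2 += ('0'*(4-flag)+tmp+':')
--             tmp = ''
--             flag = 0
--     ipv6_2 += ('0'*(4-flag)+tmp)
--     if ff:ipv6_2 = '[' + ipv6_2 + ']'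
--     return ipv6_2
-- ===== SOURCE B (Python) =====
-- def _is_hex_or_colon(c):
--     return c == ':' or '0' <= c <= '9' or 'A' <= c <= 'F' or 'a' <= c <= 'f'
--
-- def ipv6_1_2(ipv6_1):
--     bracketed = ipv6_1[0] == '[' and ipv6_1[-1] == ']'
--     s = ipv6_1.replace('[', '').replace(']', '')
--     if not all(_is_hex_or_colon(c) for c in s):
--         return 'Your IPv6 is wrong!'
--     if s.count('::') >= 2 or s.count(':') >= 8 or len(s) > 39:
--         return 'Your IPv6 is wrong!'
--     if '::' in s:
--         s = s.replace('::', ':' * (9 - s.count(':')))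
--     out = ':'.join(g.rjust(4, '0') for g in s.split(':'))
--     return '[' + out + ']' if bracketed else out
-- ===== Notes on version B (the rewrite author's own statement) =====
-- stated objective: idiomatic
-- what changed: replaces the character-by-character early-return validation loop with a single all() predicate pass, and replaces the flag/tmp accumulator that rebuilds the output string with a split-on-separator, left-pad-each-group, join pipeline; Pre_ excludes only the empty string, on which A raises IndexError at its first subscript.
import Mathlib
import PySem

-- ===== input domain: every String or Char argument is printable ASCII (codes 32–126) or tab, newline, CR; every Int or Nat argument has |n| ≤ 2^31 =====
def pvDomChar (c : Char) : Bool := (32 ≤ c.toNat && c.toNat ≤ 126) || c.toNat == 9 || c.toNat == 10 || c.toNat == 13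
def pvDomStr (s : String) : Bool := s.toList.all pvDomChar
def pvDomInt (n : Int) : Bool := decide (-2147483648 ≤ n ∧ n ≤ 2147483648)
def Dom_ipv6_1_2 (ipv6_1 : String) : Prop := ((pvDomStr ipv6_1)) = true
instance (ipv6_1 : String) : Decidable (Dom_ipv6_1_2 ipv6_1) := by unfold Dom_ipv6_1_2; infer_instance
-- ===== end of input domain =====

-- B replaces A's char-by-char early-return validation loop and flag/tmp accumulator rebuild
-- with an all() predicate check and ':'.join(rjust(4,'0') over split(':')) — idiomatic, same cost.


-- ===== PORT A =====
-- A's validation for-loop: returns false exactly when the loop hits the early `return 'Your IPv6 is wrong!'`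
def ipv6CheckA : List Char → Bool
  | [] => true
  | c :: rest =>
    if c == ':' || c == '[' || c == ']' then ipv6CheckA rest
    else if ¬(c.toNat ≥ '0'.toNat ∧ c.toNat ≤ '9'.toNat) ∧ ¬(c.toNat ≥ 'A'.toNat ∧ c.toNat ≤ 'F'.toNat) ∧ ¬(c.toNat ≥ 'a'.toNat ∧ c.toNat ≤ 'f'.toNat) then false
    else ipv6CheckA rest

-- A's second for-loop with its state (flag, tmp, ipv6_2); flag is a Python int
def ipv6Accum : List Char → Int → List Char → List Char → List Char
  | [], flag, tmp, acc => acc ++ PySem.List.pyRepeat ['0'] (4 - flag) ++ tmp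
  | c :: rest, flag, tmp, acc =>
    if c != ':' then ipv6Accum rest (flag + 1) (tmp ++ [c]) acc
    else ipv6Accum rest 0 [] (acc ++ PySem.List.pyRepeat ['0'] (4 - flag) ++ tmp ++ [':'])

def ipv6_1_2 (ipv6_1 : String) : String :=
  -- ff := ipv6_1[0]=='[' and ipv6_1[-1]==']'  (on Pre_, both indexings succeed)
  let ff : Bool := (PySem.Str.pyGet? ipv6_1 0 == some '[') && (PySem.Str.pyGet? ipv6_1 (-1) == some ']')
  let s := PySem.Chars.replace (PySem.Chars.replace ipv6_1.toList ['['] []) [']'] []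
  if ipv6CheckA s = false then "Your IPv6 is wrong!"
  else if PySem.Chars.count s [':', ':'] ≥ 2 ∨ PySem.Chars.count s [':'] ≥ 8 ∨ s.length > 39 then "Your IPv6 is wrong!"
  else
    let s2 := if PySem.Chars.isIn [':', ':'] s then PySem.Chars.replace s [':', ':'] (PySem.List.pyRepeat [':'] (9 - (PySem.Chars.count s [':'] : Int))) else s
    let core := ipv6Accum s2 0 [] []
    if ff then String.mk ('[' :: core ++ [']']) else String.mk core

-- ===== PORT B =====
-- c == ':' or '0' <= c <= '9' or 'A' <= c <= 'F' or 'a' <= c <= 'f'  (single-char str comparison = code-point comparison, exact)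
def ipv6HexColon (c : Char) : Bool :=
  c == ':' || decide ('0'.toNat ≤ c.toNat ∧ c.toNat ≤ '9'.toNat) || decide ('A'.toNat ≤ c.toNat ∧ c.toNat ≤ 'F'.toNat) || decide ('a'.toNat ≤ c.toNat ∧ c.toNat ≤ 'f'.toNat)

-- g.rjust(4, '0'): exact (no-op when len ≥ 4, thanks to Nat truncated subtraction)
def ipv6Rjust4 (g : List Char) : List Char := List.replicate (4 - g.length) '0' ++ g

def ipv6_1_2_alt (ipv6_1 : String) : String :=
  let bracketed : Bool := (PySem.Str.pyGet? ipv6_1 0 == some '[') && (PySem.Str.pyGet? ipv6_1 (-1) == some ']')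
  let s := PySem.Chars.replace (PySem.Chars.replace ipv6_1.toList ['['] []) [']'] []
  if !(s.all ipv6HexColon) then "Your IPv6 is wrong!"
  else if PySem.Chars.count s [':', ':'] ≥ 2 ∨ PySem.Chars.count s [':'] ≥ 8 ∨ s.length > 39 then "Your IPv6 is wrong!"
  else
    let s2 := if PySem.Chars.isIn [':', ':'] s then PySem.Chars.replace s [':', ':'] (PySem.List.pyRepeat [':'] (9 - (PySem.Chars.count s [':'] : Int))) else s
    let core := PySem.Chars.join [':'] ((PySem.Chars.splitOn s2 [':']).map ipv6Rjust4)
    if bracketed then String.mk ('[' :: core ++ [']']) else String.mk core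

-- ===== PRECONDITION & SPEC =====
-- Pre_ excludes exactly the empty string, on which A raises IndexError at ipv6_1[0].
def Pre_ipv6_1_2 (ipv6_1 : String) : Prop := ipv6_1 ≠ ""
instance (ipv6_1 : String) : Decidable (Pre_ipv6_1_2 ipv6_1) := by unfold Pre_ipv6_1_2; infer_instance
def pvWitness_ipv6_1_2 : String := "[2001:db8::1]"
def Spec_ipv6_1_2 (ipv6_1 : String) (out : String) : Prop := out = ipv6_1_2_alt ipv6_1
instance (ipv6_1 : String) (out : String) : Decidable (Spec_ipv6_1_2 ipv6_1 out) := by unfold Spec_ipv6_1_2; infer_instance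

-- ===== CLAIM (what is proved, stated in full; the proofs are below) =====
def Claim_equal_ipv6_1_2 : Prop := ∀ (ipv6_1 : String), Dom_ipv6_1_2 ipv6_1 → Pre_ipv6_1_2 ipv6_1 → Spec_ipv6_1_2 ipv6_1 (ipv6_1_2 ipv6_1)

-- ===== LEMMAS AND PROOFS =====

theorem pv_replace_go_single (b : Char) : ∀ (fuel : Nat) (l acc : List Char), l.length ≤ fuel →
    PySem.Chars.replace.go [b] [] fuel l acc = acc.reverse ++ l.filter (· ≠ b) := by
  intro fuel
  induction fuel with
  | zero =>
    intro l acc h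
    have : l = [] := List.eq_nil_of_length_eq_zero (Nat.le_zero.mp h)
    subst this
    simp [PySem.Chars.replace.go]
  | succ n ih =>
    intro l acc h
    cases l with
    | nil => simp [PySem.Chars.replace.go]
    | cons c t =>
      rw [PySem.Chars.replace.go]
      simp only [List.isPrefixOf, List.isPrefixOf_nil_left, Bool.and_true]
      by_cases hc : c = b
      · subst hc
        simp only [beq_self_eq_true, if_true, List.reverse_nil, List.nil_append, List.length_cons,
          List.length_nil, List.drop_succ_cons, List.drop_zero]
        rw [ih t acc (by simpa using h)]
        simp [List.filter_cons]
      · have : (b == c) = false := by simp [beq_eq_false_iff_ne]; exact fun e => hc e.symm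
        simp only [this, if_false]
        rw [ih t (c :: acc) (by simpa using h)]
        simp [List.filter_cons, hc]

theorem pv_replace_single (l : List Char) (b : Char) :
    PySem.Chars.replace l [b] [] = l.filter (· ≠ b) := by
  rw [PySem.Chars.replace]
  simp only [List.isEmpty_cons, if_false]
  rw [pv_replace_go_single b l.length l [] le_rfl]
  simp

theorem pv_checkA_eq_all : ∀ (l : List Char), '[' ∉ l → ']' ∉ l →
    ipv6CheckA l = l.all ipv6HexColon := by
  intro l
  induction l with
  | nil => intro _ _; rfl
  | cons c rest ih =>
    intro h1 h2
    have hc1 : c ≠ '[' := fun e => h1 (e ▸ List.mem_cons_self ..)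
    have hc2 : c ≠ ']' := fun e => h2 (e ▸ List.mem_cons_self ..)
    have ihr := ih (fun m => h1 (List.mem_cons_of_mem _ m)) (fun m => h2 (List.mem_cons_of_mem _ m))
    rw [ipv6CheckA, List.all_cons]
    by_cases hcol : c = ':'
    · subst hcol; simp [ihr, ipv6HexColon]
    · have hcond : (c == ':' || c == '[' || c == ']') = false := by
        simp [hcol, hc1, hc2]
      have hcEq : (c == ':') = false := by simp [hcol]
      rw [hcond, if_neg (by simp)]
      by_cases hx : (¬('0'.toNat ≤ c.toNat ∧ c.toNat ≤ '9'.toNat) ∧ ¬('A'.toNat ≤ c.toNat ∧ c.toNat ≤ 'F'.toNat) ∧ ¬('a'.toNat ≤ c.toNat ∧ c.toNat ≤ 'f'.toNat))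
      · rw [if_pos (by exact ⟨hx.1, hx.2.1, hx.2.2⟩)]
        have hfalse : ipv6HexColon c = false := by
          rw [ipv6HexColon, hcEq, decide_eq_false hx.1, decide_eq_false hx.2.1, decide_eq_false hx.2.2]; rfl
        rw [hfalse, Bool.false_and]
      · rw [if_neg (by exact hx), ihr]
        have htrue : ipv6HexColon c = true := by
          rw [ipv6HexColon]
          by_cases h9 : ('0'.toNat ≤ c.toNat ∧ c.toNat ≤ '9'.toNat)
          · rw [decide_eq_true h9]; simp
          by_cases hF : ('A'.toNat ≤ c.toNat ∧ c.toNat ≤ 'F'.toNat)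
          · rw [decide_eq_true hF]; simp
          by_cases hf : ('a'.toNat ≤ c.toNat ∧ c.toNat ≤ 'f'.toNat)
          · rw [decide_eq_true hf]; simp
          exact absurd ⟨h9, hF, hf⟩ hx
        rw [htrue, Bool.true_and]

def pvConsHead (p : List Char) : List (List Char) → List (List Char)
  | [] => [p]
  | g :: gs => (p ++ g) :: gs
def pvSplit (sep : Char) : List Char → List (List Char)
  | [] => [[]]
  | c :: rest => if c = sep then [] :: pvSplit sep rest else (pvSplit sep rest).modifyHead (c :: ·)
theorem pvSplit_ne_nil (sep : Char) (l : List Char) : pvSplit sep l ≠ [] := by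
  cases l with
  | nil => simp [pvSplit]
  | cons c rest =>
    simp only [pvSplit]
    split
    · simp
    · cases h : pvSplit sep rest with
      | nil => exact absurd h (pvSplit_ne_nil sep rest)
      | cons g gs => simp
theorem pvConsHead_nil {gs : List (List Char)} (h : gs ≠ []) : pvConsHead [] gs = gs := by
  cases gs with
  | nil => exact absurd rfl h
  | cons g gs' => simp [pvConsHead]
theorem pvConsHead_modifyHead (p : List Char) (c : Char) {gs : List (List Char)} (h : gs ≠ []) :
    pvConsHead p (gs.modifyHead (c :: ·)) = pvConsHead (p ++ [c]) gs := by
  cases gs with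
  | nil => exact absurd rfl h
  | cons g gs' => simp [pvConsHead]
theorem pv_splitOn_go_single (sep : Char) : ∀ (fuel : Nat) (l cur : List Char) (acc : List (List Char)), l.length < fuel →
    PySem.Chars.splitOn.go [sep] fuel l cur acc = acc.reverse ++ pvConsHead cur.reverse (pvSplit sep l) := by
  intro fuel
  induction fuel with
  | zero => intro l cur acc h; omega
  | succ n ih =>
    intro l cur acc h
    cases l with
    | nil =>
      rw [PySem.Chars.splitOn.go]
      all_goals simp [pvSplit, pvConsHead]
    | cons c t =>
      rw [PySem.Chars.splitOn.go]
      simp only [List.isPrefixOf, List.isPrefixOf_nil_left, Bool.and_true]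
      by_cases hc : c = sep
      · subst hc
        simp only [beq_self_eq_true, if_true, List.length_cons, List.length_nil, List.drop_succ_cons, List.drop_zero]
        rw [ih t [] (cur.reverse :: acc) (by simpa using h)]
        rw [List.reverse_cons, show ([] : List Char).reverse = [] from rfl,
          pvConsHead_nil (pvSplit_ne_nil _ _)]
        simp [pvSplit, pvConsHead]
      · have hbc : (sep == c) = false := by simp; exact fun e => hc e.symm
        rw [hbc]
        simp only [Bool.false_eq_true, if_false]
        rw [ih t (c :: cur) acc (by simpa using h)]
        simp only [pvSplit, if_neg hc, List.reverse_cons]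
        rw [pvConsHead_modifyHead _ _ (pvSplit_ne_nil _ _)]
theorem pv_splitOn_single (l : List Char) (sep : Char) :
    PySem.Chars.splitOn l [sep] = pvConsHead [] (pvSplit sep l) := by
  rw [PySem.Chars.splitOn, pv_splitOn_go_single sep (l.length + 1) l [] [] (by omega)]
  simp
def pvPadJoin (gs : List (List Char)) : List Char := PySem.Chars.join [':'] (gs.map ipv6Rjust4)

theorem pv_pad_eq (tmp : List Char) :
    PySem.List.pyRepeat ['0'] (4 - (tmp.length : Int)) ++ tmp = ipv6Rjust4 tmp := by
  rw [PySem.List.pyRepeat_singleton, ipv6Rjust4]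
  congr 1
  congr 1
  omega

theorem pv_accum_eq : ∀ (l tmp acc : List Char),
    ipv6Accum l (tmp.length : Int) tmp acc = acc ++ pvPadJoin (pvConsHead tmp (pvSplit ':' l)) := by
  intro l
  induction l with
  | nil =>
    intro tmp acc
    rw [ipv6Accum, List.append_assoc, pv_pad_eq]
    simp only [pvSplit, pvConsHead, pvPadJoin, List.map_cons, List.map_nil]
    rw [PySem.Chars.join_singleton]
    simp
  | cons c rest ih =>
    intro tmp acc
    rw [ipv6Accum]
    by_cases hc : c = ':'
    · subst hc
      rw [if_neg (by simp)]
      have h0 : (0 : Int) = (([] : List Char).length : Int) := by simp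
      rw [h0, ih [] _]
      rw [pvConsHead_nil (pvSplit_ne_nil _ _)]
      obtain ⟨g, gs, hg⟩ := List.exists_cons_of_ne_nil (pvSplit_ne_nil ':' rest)
      have hsplit : pvSplit ':' (':' :: rest) = [] :: g :: gs := by simp [pvSplit, hg]
      rw [hsplit, hg]
      simp only [pvConsHead, List.append_nil, pvPadJoin, List.map_cons]
      rw [PySem.Chars.join_cons_cons]
      simp [List.append_assoc, pv_pad_eq, ipv6Rjust4]
    · rw [if_pos (by simp [hc])]
      have h1 : (tmp.length : Int) + 1 = ((tmp ++ [c]).length : Int) := by simp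
      rw [h1, ih (tmp ++ [c]) acc]
      rw [show pvSplit ':' (c :: rest) = (pvSplit ':' rest).modifyHead (c :: ·) from by
        simp [pvSplit, hc]]
      rw [pvConsHead_modifyHead _ _ (pvSplit_ne_nil _ _)]


theorem pv_core_eq (l2 : List Char) :
    ipv6Accum l2 0 [] [] = PySem.Chars.join [':'] ((PySem.Chars.splitOn l2 [':']).map ipv6Rjust4) := by
  have h := pv_accum_eq l2 [] []
  simp only [List.length_nil, Nat.cast_zero, List.nil_append] at h
  rw [h, pv_splitOn_single]
  rfl

-- ===== VERDICT (by name: the statement is the Claim_ definition above) =====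
set_option maxHeartbeats 1000000 in
theorem ipv6_1_2_spec : Claim_equal_ipv6_1_2 := by
  unfold Claim_equal_ipv6_1_2
  intro s _ _
  unfold Spec_ipv6_1_2 ipv6_1_2 ipv6_1_2_alt
  dsimp only
  rw [pv_replace_single, pv_replace_single]
  have hnb1 : '[' ∉ ((s.toList.filter (· ≠ '[')).filter (· ≠ ']')) := by
    simp [List.mem_filter]
  have hnb2 : ']' ∉ ((s.toList.filter (· ≠ '[')).filter (· ≠ ']')) := by
    simp [List.mem_filter]
  rw [pv_checkA_eq_all _ hnb1 hnb2]
  cases hall : ((s.toList.filter (· ≠ '[')).filter (· ≠ ']')).all ipv6HexColon <;>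
    simp only [hall, Bool.not_false, Bool.not_true, if_pos, if_neg, Bool.false_eq_true,
      Bool.true_eq_false, if_true, if_false, reduceIte]
  split_ifs with hg <;> first | rfl | rw [pv_core_eq]
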